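-- pv_equiv track=rewrite | github.com/Cornelius-G/ithephy_parser | ithephy_parser.py | create_label_dict
-- ===== SOURCE A (Python) =====
-- def create_label_dict(s):
--     refs = {}
--     s = s.split("\\label{")
--     l = len(s)
--     for i in range(1, l):
--         ref = s[i].split("}")[0]
--         refs[i] = ref
--     return refs
-- ===== SOURCE B (Python) =====
-- def create_label_dict(s):
--     # single left-to-right scan: find each "\label{" marker and collect the
--     # reference text up to the first "}" (or the next marker / end of string)
--     M = "\\label{"
--     refs = {}
--     k = 0
--     i = 0
--     n = len(s)
--     while i < n:
--         if s.startswith(M, i):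
--             k += 1
--             i += 7
--             buf = []
--             while i < n and s[i] != "}" and not s.startswith(M, i):
--                 buf.append(s[i])
--                 i += 1
--             refs[k] = "".join(buf)
--         else:
--             i += 1
--     return refs
-- ===== Notes on version B (the rewrite author's own statement) =====
-- stated objective: alternative
-- what changed: Replaces the split-on-marker pass plus a per-segment split-on-brace with one direct left-to-right character scan that finds each \label{ marker and collects the reference up to the first } or the next marker, building the dict as it goes.
import Mathlib
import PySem

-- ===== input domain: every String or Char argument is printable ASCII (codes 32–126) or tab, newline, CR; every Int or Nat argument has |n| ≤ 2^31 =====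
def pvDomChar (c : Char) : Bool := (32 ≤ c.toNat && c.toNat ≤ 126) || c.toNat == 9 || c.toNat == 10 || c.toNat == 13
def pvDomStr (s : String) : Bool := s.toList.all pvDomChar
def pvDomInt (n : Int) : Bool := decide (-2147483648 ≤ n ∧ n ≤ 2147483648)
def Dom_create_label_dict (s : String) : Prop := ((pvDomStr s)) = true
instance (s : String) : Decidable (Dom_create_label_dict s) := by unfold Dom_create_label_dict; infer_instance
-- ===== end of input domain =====

-- B replaces A's split-on-marker + per-segment split-on-brace with one direct
-- left-to-right character scan (alternative decomposition, same O(n) cost).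


-- ===== PORT A =====
def create_label_dict (s : String) : List (Int × String) :=
  let parts := PySem.Chars.splitOn s.toList "\\label{".toList
  let l : Int := (parts.length : Int)
  let refs : PySem.Dict Int String :=
    (PySem.List.pyRange 1 l 1).foldl
      (fun d i =>
        d.insert i (String.ofList (PySem.List.pyGetD
          (PySem.Chars.splitOn (PySem.List.pyGetD parts i []) "}".toList) 0 [])))
      PySem.Dict.empty
  refs.items

-- ===== PORT B =====
-- inner while loop of B: collect chars until '}', the next "\label{", or the end
def clildCollect (cs : List Char) : List Char × List Char :=
  match cs with
  | [] => ([], [])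
  | c :: rest =>
    if c = '}' ∨ "\\label{".toList.isPrefixOf (c :: rest) then ([], c :: rest)
    else
      let p := clildCollect rest
      (c :: p.1, p.2)

theorem clildCollect_len (cs : List Char) : (clildCollect cs).2.length ≤ cs.length := by
  induction cs with
  | nil => simp [clildCollect]
  | cons c rest ih =>
    simp only [clildCollect]
    split
    · simp
    · simpa using Nat.le_succ_of_le ih

-- outer while loop of B
def clildScan (cs : List Char) (k : Int) : List (Int × String) :=
  match cs with
  | [] => []
  | c :: rest =>
    if "\\label{".toList.isPrefixOf (c :: rest) then
      let p := clildCollect ((c :: rest).drop 7)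
      (k + 1, String.ofList p.1) :: clildScan p.2 (k + 1)
    else clildScan rest k
termination_by cs.length
decreasing_by
  · calc (clildCollect ((c :: rest).drop 7)).2.length
        ≤ ((c :: rest).drop 7).length := clildCollect_len _
      _ < (c :: rest).length := by simp
  · simp

def create_label_dict_alt (s : String) : List (Int × String) :=
  clildScan s.toList 0

-- ===== PRECONDITION & SPEC =====
def Spec_create_label_dict (s : String) (out : List (Int × String)) : Prop := out = create_label_dict_alt s
instance (s : String) (out : List (Int × String)) : Decidable (Spec_create_label_dict s out) := by unfold Spec_create_label_dict; infer_instance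

-- ===== CLAIM (what is proved, stated in full; the proofs are below) =====
def Claim_equal_create_label_dict : Prop := ∀ (s : String), Dom_create_label_dict s → Spec_create_label_dict s (create_label_dict s)

-- ===== LEMMAS AND PROOFS =====

-- reference characterisation of splitOn (nonempty separator)
def pvSplit (sep : List Char) : List Char → List (List Char)
  | [] => [[]]
  | c :: rest =>
    if _h : sep ≠ [] ∧ sep.isPrefixOf (c :: rest) then
      [] :: pvSplit sep ((c :: rest).drop sep.length)
    else
      match pvSplit sep rest with
      | [] => [[c]]
      | h :: t => (c :: h) :: t
termination_by l => l.length
decreasing_by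
  · simp; cases sep with
    | nil => exact absurd rfl _h.1
    | cons a as => simp
  · simp

theorem pvSplit_ne_nil (sep l) : pvSplit sep l ≠ [] := by
  cases l with
  | nil => simp [pvSplit]
  | cons c rest =>
    rw [pvSplit]
    split
    · simp
    · rcases h : pvSplit sep rest with _ | ⟨hd, tl⟩ <;> simp

theorem go_eq (sep : List Char) (hsep : sep ≠ []) :
    ∀ (fuel : Nat) (l cur : List Char) (acc : List (List Char)), l.length < fuel →
      PySem.Chars.splitOn.go sep fuel l cur acc
        = acc.reverse ++ (pvSplit sep l).modifyHead (cur.reverse ++ ·) := by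
  intro fuel
  induction fuel with
  | zero => intro l cur acc h; omega
  | succ fuel ih =>
    intro l cur acc h
    cases l with
    | nil =>
      rw [PySem.Chars.splitOn.go]
      all_goals simp [pvSplit]
    | cons c rest =>
      rw [PySem.Chars.splitOn.go, pvSplit]
      by_cases hp : sep.isPrefixOf (c :: rest)
      · rw [if_pos hp]
        rw [ih _ _ _ (by
          have hs : 1 ≤ sep.length := List.length_pos_of_ne_nil hsep
          simp at h ⊢; omega)]
        simp [hsep, hp]
        exact congrFun List.modifyHead_id _
      · rw [if_neg hp]
        rw [ih _ _ _ (by simp at h ⊢; omega)]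
        have hcond : ¬ (sep ≠ [] ∧ sep.isPrefixOf (c :: rest) = true) := by
          intro hc; exact hp hc.2
        rw [dif_neg hcond]
        rcases hsp : pvSplit sep rest with _ | ⟨hd, tl⟩
        · exact absurd hsp (pvSplit_ne_nil sep rest)
        · simp

theorem splitOn_eq_pvSplit (l sep : List Char) (hsep : sep ≠ []) :
    PySem.Chars.splitOn l sep = pvSplit sep l := by
  rw [PySem.Chars.splitOn, go_eq sep hsep _ _ _ _ (Nat.lt_succ_self _)]
  simp
  exact congrFun List.modifyHead_id _

theorem pyGetD_zero_cons {α : Type} (x : α) (xs : List α) (d : α) :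
    PySem.List.pyGetD (x :: xs) 0 d = x := by
  simp [PySem.List.pyGetD, PySem.List.pyGet?, PySem.List.pyIdx?]

-- head of split("}") is takeWhile (≠ '}')
theorem head0_pvSplit (l : List Char) :
    PySem.List.pyGetD (pvSplit "}".toList l) 0 [] = l.takeWhile (fun c => c != '}') := by
  induction l with
  | nil => simp [pvSplit]
  | cons c rest ih =>
    rw [pvSplit]
    by_cases hc : c = '}'
    · subst hc
      rw [dif_pos ⟨by simp, by simp [List.isPrefixOf]⟩]
      rw [pyGetD_zero_cons]
      simp [List.takeWhile]
    · rw [dif_neg (by simp [List.isPrefixOf]; intro hh; exact hc hh.symm)]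
      rcases hsp : pvSplit "}".toList rest with _ | ⟨hd, tl⟩
      · exact absurd hsp (pvSplit_ne_nil _ _)
      · rw [hsp] at ih
        rw [pyGetD_zero_cons] at ih
        rw [pyGetD_zero_cons, List.takeWhile_cons]
        have hbne : (c != '}') = true := by simp [hc]
        rw [hbne, ih]
        simp

theorem clildCollect_spec (l : List Char) :
    (clildCollect l).1 = ((pvSplit "\\label{".toList l).headD []).takeWhile (fun c => c != '}')
    ∧ (pvSplit "\\label{".toList (clildCollect l).2).tail = (pvSplit "\\label{".toList l).tail := by
  induction l with
  | nil => simp [clildCollect, pvSplit]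
  | cons c rest ih =>
    rw [clildCollect]
    by_cases hp : "\\label{".toList.isPrefixOf (c :: rest)
    · rw [if_pos (Or.inr hp)]
      constructor
      · rw [pvSplit, dif_pos ⟨by simp, hp⟩]
        simp
      · rfl
    · by_cases hc : c = '}'
      · rw [if_pos (Or.inl hc)]
        constructor
        · rw [pvSplit, dif_neg (by intro hh; exact hp hh.2)]
          rcases hsp : pvSplit "\\label{".toList rest with _ | ⟨hd, tl⟩
          · exact absurd hsp (pvSplit_ne_nil _ _)
          · simp [hc]
        · rfl
      · rw [if_neg (by rintro (h1 | h2); exact hc h1; exact hp h2)]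
        rw [pvSplit, dif_neg (by intro hh; exact hp hh.2)]
        rcases hsp : pvSplit "\\label{".toList rest with _ | ⟨hd, tl⟩
        · exact absurd hsp (pvSplit_ne_nil _ _)
        · rw [hsp] at ih
          refine ⟨?_, ?_⟩
          · simp only [List.headD_cons] at ih ⊢
            rw [List.takeWhile_cons]
            have hbne : (c != '}') = true := by simp [hc]
            rw [hbne, ih.1]
            simp
          · simpa using ih.2

theorem clildScan_spec : ∀ (n : Nat) (l : List Char) (k : Int), l.length ≤ n →
    clildScan l k = PySem.List.enumerate
      ((pvSplit "\\label{".toList l).tail.map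
        (fun seg => String.ofList (seg.takeWhile (fun c => c != '}')))) (k + 1) := by
  intro n
  induction n with
  | zero =>
    intro l k h
    have : l = [] := List.eq_nil_of_length_eq_zero (Nat.le_zero.mp h)
    subst this
    simp [clildScan, pvSplit]
  | succ n ih =>
    intro l k h
    cases l with
    | nil => simp [clildScan, pvSplit]
    | cons c rest =>
      rw [clildScan]
      by_cases hp : "\\label{".toList.isPrefixOf (c :: rest)
      · rw [if_pos hp]
        have hlen7 : ("\\label{".toList).length = 7 := by decide
        have hd7 : List.drop ("\\label{".toList).length (c :: rest) = List.drop 7 (c :: rest) := by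
          rw [hlen7]
        rw [pvSplit, dif_pos ⟨by simp, hp⟩, hd7]
        set d := List.drop 7 (c :: rest) with hd
        show (k + 1, String.ofList (clildCollect d).1) :: clildScan (clildCollect d).2 (k + 1)
          = _
        rcases hsp : pvSplit "\\label{".toList d with _ | ⟨s0, ss⟩
        · exact absurd hsp (pvSplit_ne_nil _ _)
        · have hcs := clildCollect_spec d
          rw [hsp] at hcs
          have hlen2 : (clildCollect d).2.length ≤ n := by
            have := clildCollect_len d
            have hdl : d.length ≤ rest.length := by
              rw [hd]
              simp only [List.length_drop, List.length_cons]
              omega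
            simp only [List.length_cons] at h
            omega
          rw [ih _ _ hlen2, hcs.2]
          simp only [List.tail_cons, List.map_cons, PySem.List.enumerate_cons, hcs.1,
            List.headD_cons]
      · rw [if_neg hp]
        rw [pvSplit, dif_neg (by intro hh; exact hp hh.2)]
        rcases hsp : pvSplit "\\label{".toList rest with _ | ⟨hd, tl⟩
        · exact absurd hsp (pvSplit_ne_nil _ _)
        · have := ih rest k (by simp at h; omega)
          rw [hsp] at this
          simpa using this

-- ===== VERDICT (by name: the statement is the Claim_ definition above) =====
theorem create_label_dict_spec : Claim_equal_create_label_dict := by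
  intro s _
  unfold Spec_create_label_dict create_label_dict create_label_dict_alt
  rw [splitOn_eq_pvSplit s.toList _ (by decide)]
  set parts := pvSplit "\\label{".toList s.toList with hparts
  have hne : parts ≠ [] := pvSplit_ne_nil _ _
  rw [PySem.Dict.items_foldl_insert_fresh
      (PySem.List.pyRange 1 (parts.length : Int) 1) (fun i => i)
      (fun i => String.ofList (PySem.List.pyGetD
        (PySem.Chars.splitOn (PySem.List.pyGetD parts i []) "}".toList) 0 []))
      PySem.Dict.empty
      (fun a _ => PySem.Dict.contains_empty a)
      (by simpa using PySem.List.nodup_pyRange_one 1 (parts.length : Int))]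
  rw [clildScan_spec s.toList.length s.toList 0 le_rfl]
  rw [← hparts]
  have hitems : (PySem.Dict.empty : PySem.Dict Int String).items = [] := rfl
  rw [hitems, List.nil_append]
  have hlen : ((parts.length : Int) - 1).toNat = parts.tail.length := by
    have : 0 < parts.length := List.length_pos_of_ne_nil hne
    simp [List.length_tail]
  apply List.ext_getElem
  · simp [PySem.List.length_pyRange_one, PySem.List.length_enumerate, hlen]
  · intro j h1 h2
    have hj : j < ((parts.length : Int) - 1).toNat := by
      simpa [PySem.List.length_pyRange_one] using h1
    have hjp : j + 1 < parts.length := by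
      rw [hlen] at hj
      simp [List.length_tail] at hj
      omega
    rw [List.getElem_map, PySem.List.getElem_pyRange_one 1 _ j
      (by simpa [PySem.List.length_pyRange_one] using hj)]
    rw [PySem.List.getElem_enumerate _ _ j
      (by simp [PySem.List.length_enumerate, List.length_tail]; omega)]
    have hget : PySem.List.pyGetD parts (1 + (j : Int)) [] = parts[j + 1] := by
      rw [PySem.List.pyGetD_eq_getElem parts [] (by omega) (by omega)]
      congr 1
      omega
    rw [hget, splitOn_eq_pvSplit _ _ (by decide), head0_pvSplit]
    rw [List.getElem_map, List.getElem_tail]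
    ring_nf
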